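-- pv_equiv track=rewrite | github.com/pranavktrpl/Composition-Extraction | Pipeline_Dhruvil/llmasJudge.py | get_unmatched_compositions
-- ===== SOURCE A (Python) =====
-- def get_unmatched_compositions(all_comps, matched_comps):
--     """
--     Get compositions that were not matched by the model
--
--     Args:
--         all_comps: List of all test compositions
--         matched_comps: List of compositions that were matched
--
--     Returns:
--         List of unmatched compositions
--     """
--     matched_keys = {f"{m['pii']}:{m['composition']}" for m in matched_comps}
--     unmatched = []
--
--     for comp in all_comps:
--         comp_key = f"{comp['pii']}:{comp['composition']}"
--         if comp_key not in matched_keys: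
--             unmatched.append(comp)
--
--     return unmatched
-- ===== SOURCE B (Python) =====
-- def get_unmatched_compositions(all_comps, matched_comps):
--     """Successive subtraction: each matched composition's key deletes its
--     occurrences from the remaining list; no matched-key set, no per-comp
--     membership test."""
--     remaining = list(all_comps)
--     for m in matched_comps:
--         mk = f"{m['pii']}:{m['composition']}"
--         remaining = [c for c in remaining
--                      if f"{c['pii']}:{c['composition']}" != mk]
--     return remaining
-- ===== Notes on version B (the rewrite author's own statement) =====
-- stated objective: alternative
-- what changed: B inverts the traversal: instead of building a set of matched keys and filtering all_comps once, it loops over matched_comps and successively subtracts each matched key's occurrences from the remaining list.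
import Mathlib
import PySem

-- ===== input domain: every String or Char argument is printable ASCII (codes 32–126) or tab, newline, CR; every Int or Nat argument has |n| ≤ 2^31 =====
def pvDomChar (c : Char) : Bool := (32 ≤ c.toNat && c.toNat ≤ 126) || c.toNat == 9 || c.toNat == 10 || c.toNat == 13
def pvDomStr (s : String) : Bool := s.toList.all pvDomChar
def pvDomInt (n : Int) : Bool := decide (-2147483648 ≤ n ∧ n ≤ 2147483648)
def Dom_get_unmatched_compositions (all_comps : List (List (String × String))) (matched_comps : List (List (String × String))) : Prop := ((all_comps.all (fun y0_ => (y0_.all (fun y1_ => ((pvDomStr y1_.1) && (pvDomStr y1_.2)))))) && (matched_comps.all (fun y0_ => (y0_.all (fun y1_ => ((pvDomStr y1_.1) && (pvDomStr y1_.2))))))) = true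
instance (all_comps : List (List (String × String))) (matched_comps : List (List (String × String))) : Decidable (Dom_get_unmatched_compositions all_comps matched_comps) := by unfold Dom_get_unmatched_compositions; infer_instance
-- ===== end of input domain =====

-- B inverts the traversal: instead of a set of matched keys and one filtering pass over
-- all_comps, it loops over matched_comps, subtracting each matched key's occurrences from
-- the remaining list (alternative decomposition, same result).

-- ===== PORT A =====
-- f"{d['pii']}:{d['composition']}"; none = KeyError (a missing key), excluded by Pre_.
def pvKey (d : List (String × String)) : Option String :=
  match d.find? (fun kv => kv.1 == "pii"), d.find? (fun kv => kv.1 == "composition") with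
  | some p, some c => some (p.2 ++ ":" ++ c.2)
  | _, _ => none

def get_unmatched_compositions (all_comps : List (List (String × String))) (matched_comps : List (List (String × String))) : List (List (String × String)) :=
  let matched_keys := PySem.Set.ofList (matched_comps.map pvKey)
  all_comps.foldl
    (fun unmatched comp =>
      if !(PySem.Set.contains matched_keys (pvKey comp)) then unmatched ++ [comp]
      else unmatched)
    []

-- ===== PORT B =====
def get_unmatched_compositions_alt (all_comps : List (List (String × String))) (matched_comps : List (List (String × String))) : List (List (String × String)) :=
  matched_comps.foldl
    (fun remaining m => remaining.filter (fun c => !(pvKey c == pvKey m)))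
    all_comps

-- ===== PRECONDITION & SPEC =====
-- Pre_ excludes exactly the inputs on which Python A raises KeyError: some dict lacking
-- the 'pii' or the 'composition' key.
def Pre_get_unmatched_compositions (all_comps : List (List (String × String))) (matched_comps : List (List (String × String))) : Prop :=
  (∀ d ∈ all_comps, "pii" ∈ d.map Prod.fst ∧ "composition" ∈ d.map Prod.fst) ∧
  (∀ d ∈ matched_comps, "pii" ∈ d.map Prod.fst ∧ "composition" ∈ d.map Prod.fst)
instance (all_comps : List (List (String × String))) (matched_comps : List (List (String × String))) : Decidable (Pre_get_unmatched_compositions all_comps matched_comps) := by unfold Pre_get_unmatched_compositions; infer_instance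

def pvWitness_get_unmatched_compositions : (List (List (String × String))) × (List (List (String × String))) :=
  ([[("pii", "S1"), ("composition", "Fe2O3")], [("pii", "S2"), ("composition", "SiO2")]], [[("pii", "S1"), ("composition", "Fe2O3")]])

def Spec_get_unmatched_compositions (all_comps : List (List (String × String))) (matched_comps : List (List (String × String))) (out : List (List (String × String))) : Prop := out = get_unmatched_compositions_alt all_comps matched_comps
instance (all_comps : List (List (String × String))) (matched_comps : List (List (String × String))) (out : List (List (String × String))) : Decidable (Spec_get_unmatched_compositions all_comps matched_comps out) := by unfold Spec_get_unmatched_compositions; infer_instance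

-- ===== CLAIM (what is proved, stated in full; the proofs are below) =====
def Claim_equal_get_unmatched_compositions : Prop := ∀ (all_comps : List (List (String × String))) (matched_comps : List (List (String × String))), Dom_get_unmatched_compositions all_comps matched_comps → Pre_get_unmatched_compositions all_comps matched_comps → Spec_get_unmatched_compositions all_comps matched_comps (get_unmatched_compositions all_comps matched_comps)

-- ===== LEMMAS AND PROOFS =====

-- A's set-membership test equals a linear any-scan over matched keys, for every key value.
theorem pv_contains_eq_any (ms : List (List (String × String))) (k : Option String) :
    PySem.Set.contains (PySem.Set.ofList (ms.map pvKey)) k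
      = ms.any (fun m => pvKey m == k) := by
  rw [Bool.eq_iff_iff]
  simp only [PySem.Set.contains, List.contains_iff_mem, PySem.Set.mem_ofList,
    List.mem_map, List.any_eq_true, beq_iff_eq]

-- B's fold of successive filters collapses to one filter by "no matched key equals mine".
theorem pv_foldl_filter (ms : List (List (String × String))) (l : List (List (String × String))) :
    ms.foldl (fun r m => r.filter (fun c => !(pvKey c == pvKey m))) l
      = l.filter (fun c => !(ms.any (fun m => pvKey m == pvKey c))) := by
  induction ms generalizing l with
  | nil => simp
  | cons m ms ih =>
    rw [List.foldl_cons, ih, List.filter_filter]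
    apply List.filter_congr
    intro c _
    simp only [List.any_cons, Bool.not_or, Bool.and_comm]
    cases h : pvKey m == pvKey c with
    | true => simp [beq_iff_eq] at h; simp [h]
    | false =>
      have : (pvKey c == pvKey m) = false := by
        cases h' : pvKey c == pvKey m
        · rfl
        · simp [beq_iff_eq] at h'; simp [h'] at h
      simp [this]

-- ===== VERDICT (by name: the statement is the Claim_ definition above) =====
theorem get_unmatched_compositions_spec : Claim_equal_get_unmatched_compositions := by
  intro all_comps matched_comps _ _
  unfold Spec_get_unmatched_compositions get_unmatched_compositions get_unmatched_compositions_alt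
  rw [PySem.List.foldl_append_if_eq_filter, pv_foldl_filter]
  simp only [List.nil_append]
  apply List.filter_congr
  intro comp _
  rw [pv_contains_eq_any]
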